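-- pv_equiv track=rewrite | github.com/Falux-27/Python-base | Color_matrice.py | generate_matrice
-- ===== SOURCE A (Python) =====
-- def generate_matrice(shape):
--     matrice = []
--     for ligne in range(shape):
--         elt_ligne = []
--         for colonne in range(shape):
--             elt_ligne.append(ligne * shape + colonne + 1)  # Générer des valeurs consécutives
--         matrice.append(elt_ligne)
--     return matrice
-- ===== SOURCE B (Python) =====
-- def generate_matrice(shape):
--     n = max(shape, 0)
--     flat = list(range(1, n * n + 1))
--     return [flat[i * n:(i + 1) * n] for i in range(n)]
-- ===== Notes on version B (the rewrite author's own statement) =====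
-- stated objective: alternative
-- what changed: B generates the whole consecutive sequence once with range(1, shape*shape+1) and partitions it into rows by slicing, instead of recomputing each entry from its (row, col) indices in a doubly-nested append loop.
import Mathlib
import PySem

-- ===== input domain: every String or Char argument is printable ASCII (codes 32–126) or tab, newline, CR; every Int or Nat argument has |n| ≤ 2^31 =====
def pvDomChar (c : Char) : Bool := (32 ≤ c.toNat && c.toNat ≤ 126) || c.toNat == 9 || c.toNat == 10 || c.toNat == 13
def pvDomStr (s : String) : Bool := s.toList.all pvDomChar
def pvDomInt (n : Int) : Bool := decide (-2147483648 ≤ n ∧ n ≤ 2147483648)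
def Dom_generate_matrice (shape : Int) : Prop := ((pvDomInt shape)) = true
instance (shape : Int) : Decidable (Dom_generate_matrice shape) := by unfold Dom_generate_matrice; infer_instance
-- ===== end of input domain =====

-- B builds the flat consecutive sequence once and chunks it into rows by slicing,
-- instead of recomputing each entry from its (row, col) indices in nested loops.

-- ===== PORT A =====
def generate_matrice (shape : Int) : List (List Int) :=
  (PySem.List.pyRange 0 shape 1).foldl (fun matrice ligne =>
    matrice ++ [(PySem.List.pyRange 0 shape 1).foldl
      (fun elt_ligne colonne => elt_ligne ++ [ligne * shape + colonne + 1]) []]) []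

-- ===== PORT B =====
def generate_matrice_alt (shape : Int) : List (List Int) :=
  let n := max shape 0
  let flat := PySem.List.pyRange 1 (n * n + 1) 1
  (PySem.List.pyRange 0 n 1).map (fun i =>
    PySem.List.slice flat (some (i * n)) (some ((i + 1) * n)))

-- ===== PRECONDITION & SPEC =====
def Spec_generate_matrice (shape : Int) (out : List (List Int)) : Prop := out = generate_matrice_alt shape
instance (shape : Int) (out : List (List Int)) : Decidable (Spec_generate_matrice shape out) := by unfold Spec_generate_matrice; infer_instance

-- ===== CLAIM (what is proved, stated in full; the proofs are below) =====
def Claim_equal_generate_matrice : Prop := ∀ (shape : Int), Dom_generate_matrice shape → Spec_generate_matrice shape (generate_matrice shape)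

-- ===== LEMMAS AND PROOFS =====

-- Each row is equal: A's index formula vs B's slice of the flat range.
theorem row_eq (shape i : Int) (h0 : 0 ≤ i) (h1 : i < shape) :
    (PySem.List.pyRange 0 shape 1).map (fun c => i * shape + c + 1) =
    PySem.List.slice (PySem.List.pyRange 1 (shape * shape + 1) 1)
      (some (i * shape)) (some ((i + 1) * shape)) := by
  have hs : 0 ≤ shape := le_of_lt (lt_of_le_of_lt h0 h1)
  have ha : 0 ≤ i * shape := mul_nonneg h0 hs
  have hb : 0 ≤ (i + 1) * shape := mul_nonneg (by omega) hs
  rw [PySem.List.slice_toNat _ ha hb]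
  apply List.ext_getElem
  · have h2 : (i + 1) * shape = i * shape + shape := by ring
    simp [PySem.List.length_pyRange_one, h2]
    have hle : i * shape + shape ≤ shape * shape := by nlinarith
    omega
  · intro k hk1 hk2
    simp [PySem.List.length_pyRange_one] at hk1
    have hk : k < shape.toNat := by omega
    have hik : (i * shape).toNat + k < (shape * shape).toNat := by
      have : i * shape + (k : Int) < shape * shape := by
        have hkI : (k : Int) < shape := by omega
        nlinarith
      omega
    simp only [List.getElem_map, List.getElem_take, List.getElem_drop]
    rw [PySem.List.getElem_pyRange_one, PySem.List.getElem_pyRange_one]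
    have : ((i * shape).toNat : Int) = i * shape := Int.toNat_of_nonneg ha
    omega

theorem generate_matrice_eq_map (shape : Int) :
    generate_matrice shape =
    (PySem.List.pyRange 0 shape 1).map (fun i =>
      (PySem.List.pyRange 0 shape 1).map (fun c => i * shape + c + 1)) := by
  unfold generate_matrice
  rw [PySem.List.foldl_append_singleton_eq_map]
  simp only [List.nil_append]
  apply List.map_congr_left
  intro i _
  rw [PySem.List.foldl_append_singleton_eq_map]
  simp

-- ===== VERDICT (by name: the statement is the Claim_ definition above) =====
theorem generate_matrice_spec : Claim_equal_generate_matrice := by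
  intro shape _
  unfold Spec_generate_matrice generate_matrice_alt
  by_cases hs : shape ≤ 0
  · rw [generate_matrice_eq_map]
    have h1 : PySem.List.pyRange 0 shape 1 = [] := PySem.List.pyRange_one_eq_nil hs
    have h2 : PySem.List.pyRange 0 (max shape 0) 1 = [] := PySem.List.pyRange_one_eq_nil (by omega)
    simp [h1, h2]
  · have hs' : 0 < shape := by omega
    have hmax : max shape 0 = shape := max_eq_left (le_of_lt hs')
    rw [generate_matrice_eq_map, hmax]
    apply List.map_congr_left
    intro i hi
    rw [PySem.List.mem_pyRange_one] at hi
    exact row_eq shape i hi.1 hi.2
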